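-- pv_equiv track=rewrite | github.com/tzielund/labs-tzielund_llms-streamlit | gutenberg_util.py | identify_book
-- ===== SOURCE A (Python) =====
-- def identify_book(book_text):
--     # Given a block of text, identify the book title and author
--     # The title is on a line starting Title:
--     # The author is on a line starting Author:
--     title = "Unknown"
--     author = "Unknown"
--     for line in book_text.split("\n"):
--         if line.startswith("Title: "):
--             title = line[7:]
--         if line.startswith("Author: "):
--             author = line[8:]
--     return title, author
-- ===== SOURCE B (Python) =====
-- def identify_book(book_text):
--     # Parse every "key: value" line into a dict (later lines overwrite earlier
--     # ones), then look the two wanted fields up once at the end.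
--     fields = {}
--     for line in book_text.split("\n"):
--         key, sep, value = line.partition(": ")
--         if sep:
--             fields[key] = value
--     return fields.get("Title", "Unknown"), fields.get("Author", "Unknown")
-- ===== Notes on version B (the rewrite author's own statement) =====
-- stated objective: alternative
-- what changed: Instead of testing each line against the two fixed prefixes and overwriting two accumulators, B partitions every line at its first colon-space separator into a generic key/value dict and looks the Title and Author fields up once at the end.
import Mathlib
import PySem

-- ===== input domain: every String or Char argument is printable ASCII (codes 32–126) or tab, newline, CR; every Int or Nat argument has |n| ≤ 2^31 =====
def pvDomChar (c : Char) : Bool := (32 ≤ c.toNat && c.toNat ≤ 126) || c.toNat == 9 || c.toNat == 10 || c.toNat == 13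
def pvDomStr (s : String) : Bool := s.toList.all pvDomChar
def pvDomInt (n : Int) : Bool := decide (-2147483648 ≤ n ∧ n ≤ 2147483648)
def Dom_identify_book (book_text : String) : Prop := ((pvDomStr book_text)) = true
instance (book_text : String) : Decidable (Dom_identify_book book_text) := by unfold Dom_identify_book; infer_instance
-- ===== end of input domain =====

-- B parses every "key: value" line generically into a dict (later lines overwrite)
-- and looks the two fields up once, instead of A's per-prefix tests with two
-- overwritten accumulators (objective: alternative).

-- ===== PORT A =====
-- one forward pass; each matching line overwrites the corresponding accumulator
def identify_book (book_text : String) : String × String :=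
  -- split("\n"): sep is non-empty so split? never returns none; getD [] is unreachable
  let lines := (PySem.Str.split? book_text "\n").getD []
  lines.foldl (fun st line =>
    let st1 := if PySem.Str.startswith line "Title: "
               then (PySem.Str.slice line (some 7) none, st.2) else st
    if PySem.Str.startswith line "Author: "
    then (st1.1, PySem.Str.slice line (some 8) none) else st1)
    ("Unknown", "Unknown")

-- ===== PORT B =====
-- line.partition(": ") is ported by hand, exactly: find gives the FIRST occurrence
-- (-1 = absent, i.e. Python's empty sep component, so 'if sep:' is the found case),
-- and the key/value components are the slices line[:i] and line[i+2:].
def identify_book_alt (book_text : String) : String × String :=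
  let lines := (PySem.Str.split? book_text "\n").getD []
  let fields := lines.foldl (fun d line =>
    let i := PySem.Str.find line ": "
    if i = -1 then d
    else d.insert (PySem.Str.slice line none (some i))
                  (PySem.Str.slice line (some (i + 2)) none))
    (PySem.Dict.empty : PySem.Dict String String)
  (fields.getD "Title" "Unknown", fields.getD "Author" "Unknown")

-- ===== PRECONDITION & SPEC =====
def Spec_identify_book (book_text : String) (out : String × String) : Prop := out = identify_book_alt book_text
instance (book_text : String) (out : String × String) : Decidable (Spec_identify_book book_text out) := by unfold Spec_identify_book; infer_instance

-- ===== CLAIM (what is proved, stated in full; the proofs are below) =====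
def Claim_equal_identify_book : Prop := ∀ (book_text : String), Dom_identify_book book_text → Spec_identify_book book_text (identify_book book_text)

-- ===== LEMMAS AND PROOFS =====

theorem pv_no_occ (tag r : List Char) (htag : (':' : Char) ∉ tag) (j : Nat) (hj : j < tag.length) :
    ¬ [(':' : Char), ' '] <+: (tag ++ ':' :: ' ' :: r).drop j := by
  intro h
  have hdrop : (tag ++ ':' :: ' ' :: r).drop j = tag[j] :: ((tag.drop (j+1)) ++ ':' :: ' ' :: r) := by
    rw [List.drop_append_of_le_length (le_of_lt hj), List.drop_eq_getElem_cons hj,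
       List.cons_append]
  rw [hdrop] at h
  rcases h with ⟨t, ht⟩
  have : tag[j] = ':' := by
    have := congrArg (fun l => l.head?) ht
    simpa using this.symm
  exact htag (this ▸ List.getElem_mem hj)

theorem pv_find_at (tag s r : List Char) (htag : (':' : Char) ∉ tag)
    (hs : s = tag ++ ':' :: ' ' :: r) :
    PySem.Chars.find s [':', ' '] = (tag.length : Int) := by
  subst hs
  set s := tag ++ ':' :: ' ' :: r with hs
  have hocc : [(':' : Char), ' '] <+: s.drop tag.length := by
    simp [hs]
  have hnn : 0 ≤ PySem.Chars.find s [':', ' '] := by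
    rw [PySem.Chars.find_nonneg_iff]
    exact hocc.isInfix.trans (List.drop_suffix _ _).isInfix
  obtain ⟨hpre, hmin⟩ := PySem.Chars.find_spec (s := s) (sub := [':', ' ']) hnn
  set i := (PySem.Chars.find s [':', ' ']).toNat with hi
  have hile : i ≤ tag.length := by
    by_contra hgt
    exact hmin tag.length (by omega) hocc
  have hieq : i = tag.length := by
    rcases lt_or_eq_of_le hile with hlt | he
    · exact absurd hpre (pv_no_occ tag r htag i hlt)
    · exact he
  have := Int.toNat_of_nonneg hnn
  omega

def pvStepB (d : PySem.Dict String String) (line : String) : PySem.Dict String String :=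
  let i := PySem.Str.find line ": "
  if i = -1 then d
  else d.insert (PySem.Str.slice line none (some i))
                (PySem.Str.slice line (some (i + 2)) none)

theorem pv_step_get? (tag : String) (htag : (':' : Char) ∉ tag.toList)
    (d : PySem.Dict String String) (l : String) :
    (pvStepB d l).get? tag =
      (if PySem.Str.startswith l (tag ++ ": ")
       then some (PySem.Str.slice l (some ((tag.toList.length : Int) + 2)) none)
       else none).or (d.get? tag) := by
  unfold pvStepB
  have hfind : PySem.Str.find l ": " = PySem.Chars.find l.toList [':', ' '] := by
    simp [PySem.Str.find_eq]
  by_cases hneg : PySem.Str.find l ": " = -1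
  · have hsw : PySem.Str.startswith l (tag ++ ": ") = false := by
      by_contra h
      rw [Bool.not_eq_false] at h
      have hp : (tag ++ ": ").toList <+: l.toList := by
        rw [PySem.Str.startswith_eq] at h
        exact (PySem.Chars.startswith_iff _ _).mp h
      have : PySem.Chars.find l.toList [':', ' '] ≠ -1 := by
        rw [PySem.Chars.find_ne_neg_one_iff]
        refine List.IsInfix.trans ?_ hp.isInfix
        have h2 : (tag ++ ": ").toList = tag.toList ++ [':', ' '] := by simp
        rw [h2]
        exact ⟨tag.toList, [], by simp⟩
      rw [hfind] at hneg; exact this hneg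
    rw [if_pos hneg, hsw]
    simp
  · have hnn : 0 ≤ PySem.Chars.find l.toList [':', ' '] := by
      have h1 := PySem.Chars.neg_one_le_find (s := l.toList) (sub := [':', ' '])
      rw [hfind] at hneg
      rcases lt_or_eq_of_le h1 with h | h
      · omega
      · exact absurd h.symm hneg
    obtain ⟨hpre, hmin⟩ := PySem.Chars.find_spec (s := l.toList) (sub := [':', ' ']) hnn
    rw [if_neg hneg, PySem.Dict.get?_insert]
    have hkey : (PySem.Str.slice l none (some (PySem.Str.find l ": "))).toList
        = l.toList.take (PySem.Chars.find l.toList [':', ' ']).toNat := by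
      rw [PySem.Str.toList_slice, PySem.Chars.slice_eq_listSlice, hfind,
         PySem.List.slice_to _ hnn]
    by_cases hsw : PySem.Str.startswith l (tag ++ ": ") = true
    · have hp : tag.toList ++ ':' :: ' ' :: [] <+: l.toList := by
        rw [PySem.Str.startswith_eq] at hsw
        have := (PySem.Chars.startswith_iff _ _).mp hsw
        simpa using this
      obtain ⟨rest, hrest⟩ := hp
      have hl : l.toList = tag.toList ++ ':' :: ' ' :: rest := by
        rw [← hrest]; simp
      have hf5 : PySem.Chars.find l.toList [':', ' '] = (tag.toList.length : Int) :=
        pv_find_at tag.toList l.toList rest htag hl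
      have hkeq : tag = PySem.Str.slice l none (some (PySem.Str.find l ": ")) := by
        rw [← String.toList_inj, hkey, hf5]
        simp [hl]
      rw [if_pos hkeq, hsw]
      simp only [if_true, Option.some_or, Option.some.injEq]
      rw [hfind, hf5]
    · have hkne : tag ≠ PySem.Str.slice l none (some (PySem.Str.find l ": ")) := by
        intro he
        apply hsw
        have htake : l.toList.take (PySem.Chars.find l.toList [':', ' ']).toNat
            = tag.toList := by
          rw [← hkey, ← he]
        obtain ⟨t, ht⟩ := hpre
        have hl : l.toList = tag.toList ++ ':' :: ' ' :: t := by
          calc l.toList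
              = l.toList.take (PySem.Chars.find l.toList [':', ' ']).toNat
                ++ l.toList.drop (PySem.Chars.find l.toList [':', ' ']).toNat := by
                  rw [List.take_append_drop]
            _ = tag.toList ++ ':' :: ' ' :: t := by rw [htake, ← ht]; rfl
        rw [PySem.Str.startswith_eq]
        rw [PySem.Chars.startswith_iff]
        exact ⟨t, by simp [hl]⟩
      rw [if_neg hkne]
      rw [Bool.not_eq_true] at hsw
      rw [hsw]
      simp

def pvLastTag (tag : String) (n : Int) : List String → Option String
  | [] => none
  | l :: ls => (pvLastTag tag n ls).or
      (if PySem.Str.startswith l tag then some (PySem.Str.slice l (some n) none) else none)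

def pvStepA (st : String × String) (line : String) : String × String :=
  let st1 := if PySem.Str.startswith line "Title: "
             then (PySem.Str.slice line (some 7) none, st.2) else st
  if PySem.Str.startswith line "Author: "
  then (st1.1, PySem.Str.slice line (some 8) none) else st1

theorem pv_or_getD {α : Type} (o : Option α) (b : Bool) (v t : α) :
    (o.or (if b then some v else none)).getD t = o.getD (if b then v else t) := by
  cases o <;> cases b <;> rfl

theorem pv_foldB (tag : String) (htag : (':' : Char) ∉ tag.toList)
    (ls : List String) (d : PySem.Dict String String) :
    (ls.foldl pvStepB d).get? tag
      = (pvLastTag (tag ++ ": ") ((tag.toList.length : Int) + 2) ls).or (d.get? tag) := by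
  induction ls generalizing d with
  | nil => simp [pvLastTag]
  | cons l ls ih =>
      rw [List.foldl_cons, ih, pvLastTag, pv_step_get? tag htag d l, Option.or_assoc]

theorem pv_foldA (ls : List String) (t a : String) :
    ls.foldl pvStepA (t, a)
      = ((pvLastTag "Title: " 7 ls).getD t, (pvLastTag "Author: " 8 ls).getD a) := by
  induction ls generalizing t a with
  | nil => rfl
  | cons l ls ih =>
      rw [List.foldl_cons]
      have hstep : pvStepA (t, a) l
          = (if PySem.Str.startswith l "Title: "
             then PySem.Str.slice l (some 7) none else t,
             if PySem.Str.startswith l "Author: "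
             then PySem.Str.slice l (some 8) none else a) := by
        unfold pvStepA
        cases h1 : PySem.Str.startswith l "Title: " <;>
          cases h2 : PySem.Str.startswith l "Author: " <;> simp_all
      rw [hstep, ih, pvLastTag, pvLastTag, pv_or_getD, pv_or_getD]



-- ===== VERDICT (by name: the statement is the Claim_ definition above) =====
theorem identify_book_spec : Claim_equal_identify_book := by
  intro bt _
  show identify_book bt = identify_book_alt bt
  have hA : identify_book bt
      = ((PySem.Str.split? bt "\n").getD []).foldl pvStepA ("Unknown", "Unknown") := rfl
  have hB : identify_book_alt bt
      = ((((PySem.Str.split? bt "\n").getD []).foldl pvStepB PySem.Dict.empty).getD "Title" "Unknown",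
         (((PySem.Str.split? bt "\n").getD []).foldl pvStepB PySem.Dict.empty).getD "Author" "Unknown") := rfl
  rw [hA, hB]
  set ls := (PySem.Str.split? bt "\n").getD [] with hls
  have hT := pv_foldB "Title" (by decide) ls PySem.Dict.empty
  have hAu := pv_foldB "Author" (by decide) ls PySem.Dict.empty
  rw [pv_foldA]
  have h7 : (("Title".toList.length : Int) + 2) = 7 := by decide
  have h8 : (("Author".toList.length : Int) + 2) = 8 := by decide
  rw [h7] at hT
  rw [h8] at hAu
  simp only [PySem.Dict.getD_eq_get?_getD, hT, hAu, PySem.Dict.get?_empty, Option.or_none]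
  rfl
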